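-- pv_equiv track=rewrite | github.com/MeteoritoAlpha-Zerg/localzaai | andesite/connectors_code/connectors/crowdstrike/connector/tools.py | _format_device_lookup_filter_expression
-- ===== SOURCE A (Python) =====
-- def _format_device_lookup_filter_expression(hostnames: list[str], ips: list[str]) -> str | None:
--     """
--     Helper function to get device IDs based on hostnames and IPs.
--     Note: This is a hack to get an MVP. We don't want to be in the position of mediating all FQL queries between the agent and Crowdstrike.
--
--     Returns a filter expression that can be used to query devices.
--     """
--
--     if hostnames:
--         formatted_hostnames = ",".join([f"'{h}'" for h in hostnames])
--         hostname_filter = f"hostname:[{formatted_hostnames}]"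
--
--     if ips:
--         formatted_ips = ",".join([f"'{ip}'" for ip in ips])
--         local_ip_filter = f"local_ip:[{formatted_ips}]"
--
--     if hostnames and ips:
--         return f"({hostname_filter} OR {local_ip_filter})"
--     if hostnames and not ips:
--         return f"{hostname_filter}"
--     if ips and not hostnames:
--         return f"{local_ip_filter}"
--     return None
-- ===== SOURCE B (Python) =====
-- def _format_device_lookup_filter_expression(hostnames: list[str], ips: list[str]) -> str | None:
--     result = None
--     for field, values in (("hostname", hostnames), ("local_ip", ips)):
--         if not values:
--             continue
--         clause = field + ":[" + ",".join("'" + v + "'" for v in values) + "]"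
--         result = clause if result is None else f"({result} OR {clause})"
--     return result
-- ===== Notes on version B (the rewrite author's own statement) =====
-- stated objective: alternative
-- what changed: Replaces A's four-way flag combination by a single fold over a (field, values) table that merges each present clause into an Optional accumulator with '(acc OR clause)', so no branch ever counts how many filters exist.
import Mathlib
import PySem

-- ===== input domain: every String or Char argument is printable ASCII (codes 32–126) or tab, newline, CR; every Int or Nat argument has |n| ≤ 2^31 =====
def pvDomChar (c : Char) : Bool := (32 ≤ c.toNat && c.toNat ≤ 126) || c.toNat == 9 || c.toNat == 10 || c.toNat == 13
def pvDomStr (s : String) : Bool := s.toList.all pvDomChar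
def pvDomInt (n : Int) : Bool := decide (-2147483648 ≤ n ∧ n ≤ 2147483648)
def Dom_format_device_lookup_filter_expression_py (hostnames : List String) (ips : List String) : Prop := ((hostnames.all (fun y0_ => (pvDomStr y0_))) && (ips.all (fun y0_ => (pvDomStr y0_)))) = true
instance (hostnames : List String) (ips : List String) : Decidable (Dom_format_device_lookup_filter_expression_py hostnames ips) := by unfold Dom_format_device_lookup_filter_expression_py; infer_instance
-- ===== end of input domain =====

-- B replaces A's four-way flag combination by a fold over a (field, values) table merging each present clause into an Option accumulator via "(acc OR clause)" (objective: alternative).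


-- ===== PORT A =====
def format_device_lookup_filter_expression_py (hostnames : List String) (ips : List String) : Option String :=
  -- hostname_filter / local_ip_filter are only bound when the respective list is truthy;
  -- A only reads them under the same conditions, so binding them unconditionally here is exact.
  let hostname_filter := "hostname:[" ++ PySem.Str.join "," (hostnames.map (fun h => "'" ++ h ++ "'")) ++ "]"
  let local_ip_filter := "local_ip:[" ++ PySem.Str.join "," (ips.map (fun ip => "'" ++ ip ++ "'")) ++ "]"
  if !hostnames.isEmpty && !ips.isEmpty then
    some ("(" ++ hostname_filter ++ " OR " ++ local_ip_filter ++ ")")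
  else if !hostnames.isEmpty && ips.isEmpty then
    some hostname_filter
  else if !ips.isEmpty && hostnames.isEmpty then
    some local_ip_filter
  else
    none

-- ===== PORT B =====
-- B's loop body: fold one (field, values) row into the Option accumulator.
def pvAltStep (acc : Option String) (row : String × List String) : Option String :=
  if row.2.isEmpty then acc
  else
    let clause := row.1 ++ ":[" ++ PySem.Str.join "," (row.2.map (fun v => "'" ++ v ++ "'")) ++ "]"
    match acc with
    | none => some clause
    | some r => some ("(" ++ r ++ " OR " ++ clause ++ ")")

def format_device_lookup_filter_expression_py_alt (hostnames : List String) (ips : List String) : Option String :=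
  [("hostname", hostnames), ("local_ip", ips)].foldl pvAltStep none

-- ===== PRECONDITION & SPEC =====
def Spec_format_device_lookup_filter_expression_py (hostnames : List String) (ips : List String) (out : Option String) : Prop := out = format_device_lookup_filter_expression_py_alt hostnames ips
instance (hostnames : List String) (ips : List String) (out : Option String) : Decidable (Spec_format_device_lookup_filter_expression_py hostnames ips out) := by unfold Spec_format_device_lookup_filter_expression_py; infer_instance

-- ===== CLAIM (what is proved, stated in full; the proofs are below) =====
def Claim_equal_format_device_lookup_filter_expression_py : Prop := ∀ (hostnames : List String) (ips : List String), Dom_format_device_lookup_filter_expression_py hostnames ips → Spec_format_device_lookup_filter_expression_py hostnames ips (format_device_lookup_filter_expression_py hostnames ips)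

-- ===== LEMMAS AND PROOFS =====

-- ===== VERDICT (by name: the statement is the Claim_ definition above) =====
theorem format_device_lookup_filter_expression_py_spec : Claim_equal_format_device_lookup_filter_expression_py := by
  intro hostnames ips _
  unfold Spec_format_device_lookup_filter_expression_py
    format_device_lookup_filter_expression_py format_device_lookup_filter_expression_py_alt pvAltStep
  cases hostnames <;> cases ips <;> simp
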